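-- pv_equiv track=rewrite | github.com/MrBrantCode/unitest_baseline | mut_generate/mist_train_taco/taco_4452/solution.py | find_minimum_M
-- ===== SOURCE A (Python) =====
-- from collections import defaultdict
--
-- def find_minimum_M(A, N):
--     L = [[]]
--     D = defaultdict(int)
--     S = set()
--     p = 0
--
--     for n in A:
--         if n in S:
--             q = D[n]
--         else:
--             S.add(n)
--             q = len(L)
--             L.append([])
--             D[n] = q
--         L[q].append(p)
--         p += 1
--
--     SL = list(S)
--     SL.sort()
--     p = 0
--     M = 1
--
--     for n in SL:
--         q = D[n]
--         if len(L[q]) == 1: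
--             z = L[q][0]
--             if z < p:
--                 M += 1
--             p = z
--         else:
--             v = L[q][-1]
--             if v > p:
--                 k = 0
--                 while L[q][k] < p:
--                     k += 1
--                 p = L[q][k]
--             else:
--                 M += 1
--                 p = L[q][0]
--
--     return M
-- ===== SOURCE B (Python) =====
-- def _bisect_left(a, x):
--     # first index i with a[i] >= x, by binary search (a ascending)
--     lo, hi = 0, len(a)
--     while lo < hi:
--         mid = (lo + hi) // 2
--         if a[mid] < x:
--             lo = mid + 1
--         else:
--             hi = mid
--     return lo
--
-- def find_minimum_M(A, N):
--     pos = {}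
--     for i, n in enumerate(A):
--         pos.setdefault(n, []).append(i)
--     M = 1
--     p = 0
--     for n in sorted(pos):
--         lst = pos[n]
--         i = _bisect_left(lst, p)
--         if i < len(lst):
--             p = lst[i]
--         else:
--             M += 1
--             p = lst[0]
--     return M
-- ===== Notes on version B (the rewrite author's own statement) =====
-- stated objective: alternative
-- what changed: A's parallel structures (list-of-lists L, value-to-slot dict D, set S) and linear while-scan per value are replaced by one dict mapping each value to its ascending position list, with a hand-written binary search (bisect_left) unifying A's singleton and general branches into a single case.
import Mathlib
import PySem

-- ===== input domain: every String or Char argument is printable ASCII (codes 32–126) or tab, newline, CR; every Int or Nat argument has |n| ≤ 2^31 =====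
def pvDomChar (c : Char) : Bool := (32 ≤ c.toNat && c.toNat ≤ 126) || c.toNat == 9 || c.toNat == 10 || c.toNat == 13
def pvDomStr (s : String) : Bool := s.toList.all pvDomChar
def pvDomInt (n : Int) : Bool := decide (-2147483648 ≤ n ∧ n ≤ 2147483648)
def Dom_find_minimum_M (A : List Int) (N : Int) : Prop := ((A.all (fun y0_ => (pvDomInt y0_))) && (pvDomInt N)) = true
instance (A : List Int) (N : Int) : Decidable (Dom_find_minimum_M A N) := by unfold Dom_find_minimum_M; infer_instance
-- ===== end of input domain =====

-- B replaces A's parallel list-of-lists/index-dict bookkeeping and linear while-scan by a single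
-- positions dict and a hand-written binary search over each (ascending) position list; same result, proved equal.

-- ===== PORT A =====
-- the while-loop 'k = 0; while L[q][k] < p: k += 1; p = L[q][k]' of A, ported as a
-- structural scan for the first element ≥ p (Python raises only if no such element exists,
-- which A's guard 'v > p' rules out)
def find_minimum_M_scan (lst : List Int) (p : Int) : Int :=
  match lst with
  | [] => 0
  | x :: xs => if x < p then find_minimum_M_scan xs p else x

def find_minimum_M_step1
    (st : List (List Int) × PySem.Dict Int Int × PySem.Set Int × Int) (n : Int) :
    List (List Int) × PySem.Dict Int Int × PySem.Set Int × Int :=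
  let (L, D, S, p) := st
  if PySem.Set.contains S n then
    let q := D.getD n 0
    (PySem.List.pySetD L q (PySem.List.pyGetD L q [] ++ [p]), D, S, p + 1)
  else
    let S' := PySem.Set.add S n
    let q : Int := PySem.List.len L
    let L' := L ++ [[]]
    let D' := D.insert n q
    (PySem.List.pySetD L' q (PySem.List.pyGetD L' q [] ++ [p]), D', S', p + 1)

def find_minimum_M_step2 (L : List (List Int)) (D : PySem.Dict Int Int)
    (Mp : Int × Int) (n : Int) : Int × Int :=
  let (M, p) := Mp
  let q := D.getD n 0
  let lst := PySem.List.pyGetD L q []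
  if lst.length == 1 then
    let z := PySem.List.pyGetD lst 0 0
    if z < p then (M + 1, z) else (M, z)
  else
    let v := PySem.List.pyGetD lst (-1) 0
    if v > p then (M, find_minimum_M_scan lst p)
    else (M + 1, PySem.List.pyGetD lst 0 0)

def find_minimum_M (A : List Int) (N : Int) : Int :=
  let st := A.foldl find_minimum_M_step1 ([[]], PySem.Dict.empty, PySem.Set.empty, 0)
  let L := st.1
  let D := st.2.1
  let S := st.2.2.1
  let SL := PySem.List.sorted S (fun x => x) false
  (SL.foldl (find_minimum_M_step2 L D) (1, 0)).1

-- ===== PORT B =====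
-- hand-written binary search of Source B (lo/hi are nonnegative ints in Python; (lo+hi)//2 on
-- nonnegative values is Nat division, so Nat is exact here)
-- the while-loop runs at most hi - lo halvings; fuel = hi - lo makes the structural
-- recursion total without changing any computed value
def find_minimum_M_bsGo (a : List Int) (x : Int) : Nat → Nat → Nat → Nat
  | 0, lo, _ => lo
  | fuel + 1, lo, hi =>
    if lo < hi then
      if PySem.List.pyGetD a (((lo + hi) / 2 : Nat) : Int) 0 < x then
        find_minimum_M_bsGo a x fuel ((lo + hi) / 2 + 1) hi
      else find_minimum_M_bsGo a x fuel lo ((lo + hi) / 2)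
    else lo

def find_minimum_M_bisect_left (a : List Int) (x : Int) : Nat :=
  find_minimum_M_bsGo a x a.length 0 a.length

def find_minimum_M_alt_step (pos : PySem.Dict Int (List Int))
    (Mp : Int × Int) (n : Int) : Int × Int :=
  let (M, p) := Mp
  let lst := pos.getD n []
  let i := find_minimum_M_bisect_left lst p
  if i < lst.length then (M, PySem.List.pyGetD lst (i : Int) 0)
  else (M + 1, PySem.List.pyGetD lst 0 0)

def find_minimum_M_alt_pos (A : List Int) : PySem.Dict Int (List Int) :=
  (PySem.List.enumerate A).foldl (fun d q => d.modify q.2 [] (· ++ [q.1])) PySem.Dict.empty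

def find_minimum_M_alt (A : List Int) (N : Int) : Int :=
  let pos := find_minimum_M_alt_pos A
  ((PySem.List.sorted pos.keys (fun x => x) false).foldl
      (find_minimum_M_alt_step pos) (1, 0)).1



-- ===== PRECONDITION & SPEC =====
def Spec_find_minimum_M (A : List Int) (N : Int) (out : Int) : Prop := out = find_minimum_M_alt A N
instance (A : List Int) (N : Int) (out : Int) : Decidable (Spec_find_minimum_M A N out) := by unfold Spec_find_minimum_M; infer_instance

-- ===== CLAIM (what is proved, stated in full; the proofs are below) =====
def Claim_equal_find_minimum_M : Prop := ∀ (A : List Int) (N : Int), Dom_find_minimum_M A N → Spec_find_minimum_M A N (find_minimum_M A N)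

-- ===== LEMMAS AND PROOFS =====
def posList (xs : List Int) (n : Int) : List Int :=
  ((PySem.List.enumerate xs).filter (fun q => q.2 == n)).map (·.1)

theorem enumerate_append (xs ys : List Int) (s : Int) :
    PySem.List.enumerate (xs ++ ys) s
      = PySem.List.enumerate xs s ++ PySem.List.enumerate ys (s + xs.length) := by
  induction xs generalizing s with
  | nil => simp [PySem.List.enumerate_nil]
  | cons x xs ih =>
      simp [PySem.List.enumerate_cons, ih (s+1)]
      ring_nf

theorem posList_append (xs : List Int) (x n : Int) :
    posList (xs ++ [x]) n
      = posList xs n ++ (if x = n then [(xs.length : Int)] else []) := by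
  unfold posList
  rw [enumerate_append]
  simp [PySem.List.enumerate_cons, PySem.List.enumerate_nil, List.filter_append]
  split_ifs with h <;> simp [h]

theorem mem_posList {xs : List Int} {n i : Int} :
    i ∈ posList xs n ↔ (i, n) ∈ PySem.List.enumerate xs := by
  unfold posList
  simp only [List.mem_map, List.mem_filter]
  constructor
  · rintro ⟨⟨a, b⟩, ⟨ha, he⟩, rfl⟩; simp only [beq_iff_eq] at he; subst he; exact ha
  · intro h; exact ⟨(i, n), ⟨h, by simp⟩, rfl⟩

theorem nodup_fst_enumerate (xs : List Int) :
    ((PySem.List.enumerate xs).map (·.1)).Nodup := by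
  rw [PySem.List.map_fst_enumerate]
  exact PySem.List.nodup_pyRange_one 0 _

theorem posList_disjoint {xs : List Int} {m n i : Int}
    (hm : i ∈ posList xs m) (hn : i ∈ posList xs n) : m = n := by
  rw [mem_posList] at hm hn
  have := List.inj_on_of_nodup_map (nodup_fst_enumerate xs) hm hn rfl
  simpa using this

theorem posList_nonneg {xs : List Int} {n i : Int} (h : i ∈ posList xs n) : 0 ≤ i := by
  rw [mem_posList] at h
  have : i ∈ (PySem.List.enumerate xs).map (·.1) := List.mem_map.mpr ⟨(i,n), h, rfl⟩
  rw [PySem.List.map_fst_enumerate] at this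
  exact (PySem.List.mem_pyRange_one.mp this).1

theorem posList_pairwise (xs : List Int) (n : Int) : (posList xs n).Pairwise (· < ·) := by
  unfold posList
  apply List.Pairwise.map
  case H => exact fun a b h => h
  apply List.Pairwise.filter
  have h1 : ((PySem.List.enumerate xs).map (·.1)).Pairwise (· < ·) := by
    rw [PySem.List.map_fst_enumerate]; exact PySem.List.pairwise_lt_pyRange_one 0 _
  exact (List.pairwise_map.mp h1)

theorem posList_ne_nil {xs : List Int} {n : Int} (h : n ∈ xs) : posList xs n ≠ [] := by
  have : n ∈ (PySem.List.enumerate xs).map (·.2) := by rw [PySem.List.map_snd_enumerate]; exact h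
  obtain ⟨⟨i, m⟩, hmem, rfl⟩ := List.mem_map.mp this
  intro hnil
  have : i ∈ posList xs m := mem_posList.mpr hmem
  simp [hnil] at this

theorem posList_of_not_mem {xs : List Int} {n : Int} (h : n ∉ xs) : posList xs n = [] := by
  unfold posList
  rw [List.map_eq_nil_iff, List.filter_eq_nil_iff]
  rintro ⟨i, m⟩ hmem hbeq
  simp at hbeq; subst hbeq
  have : m ∈ (PySem.List.enumerate xs).map (·.2) := List.mem_map.mpr ⟨(i,m), hmem, rfl⟩
  rw [PySem.List.map_snd_enumerate] at this
  exact h this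

theorem ofList_append_singleton (xs : List Int) (x : Int) :
    PySem.Set.ofList (xs ++ [x]) = PySem.Set.add (PySem.Set.ofList xs) x := by
  simp [PySem.Set.ofList_eq_foldl, List.foldl_append]

theorem set_contains_iff (s : PySem.Set Int) (x : Int) :
    PySem.Set.contains s x = true ↔ x ∈ s := by
  unfold PySem.Set.contains; exact List.contains_iff_mem

theorem idxOf_inj' (l : List Int) (a b : Int) (ha : a ∈ l) (hb : b ∈ l)
    (h : List.idxOf a l = List.idxOf b l) : a = b := by
  have h1 := List.getElem_idxOf (x := a) (xs := l) (List.idxOf_lt_length_of_mem ha)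
  have h2 := List.getElem_idxOf (x := b) (xs := l) (List.idxOf_lt_length_of_mem hb)
  rw [← h1, ← h2]
  congr 1

theorem phase1_spec (xs : List Int) :
    (xs.foldl find_minimum_M_step1 ([[]], PySem.Dict.empty, PySem.Set.empty, 0)).2.2.1
        = PySem.Set.ofList xs ∧
    (xs.foldl find_minimum_M_step1 ([[]], PySem.Dict.empty, PySem.Set.empty, 0)).1.length
        = (PySem.Set.ofList xs).length + 1 ∧
    (xs.foldl find_minimum_M_step1 ([[]], PySem.Dict.empty, PySem.Set.empty, 0)).2.2.2
        = (xs.length : Int) ∧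
    ∀ n ∈ PySem.Set.ofList xs,
      (xs.foldl find_minimum_M_step1 ([[]], PySem.Dict.empty, PySem.Set.empty, 0)).2.1.getD n 0
          = ((PySem.Set.ofList xs).idxOf n : Int) + 1 ∧
      (xs.foldl find_minimum_M_step1 ([[]], PySem.Dict.empty, PySem.Set.empty, 0)).1[(PySem.Set.ofList xs).idxOf n + 1]?
          = some (posList xs n) := by
  induction xs using List.reverseRecOn with
  | nil =>
      refine ⟨rfl, rfl, rfl, ?_⟩
      intro n hn; simp [PySem.Set.ofList] at hn
  | append_singleton xs x ih =>
      obtain ⟨hS, hL, hp, hmem⟩ := ih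
      rw [List.foldl_append] at *
      simp only [List.foldl_cons, List.foldl_nil]
      generalize hst : xs.foldl find_minimum_M_step1 ([[]], PySem.Dict.empty, PySem.Set.empty, 0) = st at hS hL hp hmem ⊢
      obtain ⟨L, D, S, p⟩ := st
      simp only at hS hL hp hmem
      subst hS hp
      by_cases hx : x ∈ PySem.Set.ofList xs
      · have hc : PySem.Set.contains (PySem.Set.ofList xs) x = true := (set_contains_iff _ _).mpr hx
        simp only [find_minimum_M_step1, hc, if_true]
        have hadd : PySem.Set.add (PySem.Set.ofList xs) x = PySem.Set.ofList xs := by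
          simp only [PySem.Set.add, hc, if_true]
        rw [ofList_append_singleton, hadd]
        obtain ⟨hDx, hLx⟩ := hmem x hx
        have hidx : List.idxOf x (PySem.Set.ofList xs) < (PySem.Set.ofList xs).length :=
          List.idxOf_lt_length_of_mem hx
        have hq : D.getD x 0 = ((List.idxOf x (PySem.Set.ofList xs) + 1 : Nat) : Int) := by
          rw [hDx]; push_cast; ring
        have hget : PySem.List.pyGetD L (D.getD x 0) [] = posList xs x := by
          rw [hq, PySem.List.pyGetD_natCast, List.getD_eq_getElem?_getD, hLx]; rfl
        have hset : PySem.List.pySetD L (D.getD x 0) (PySem.List.pyGetD L (D.getD x 0) [] ++ [(xs.length : Int)])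
            = L.set (List.idxOf x (PySem.Set.ofList xs) + 1) (posList xs x ++ [(xs.length : Int)]) := by
          rw [hget, hq, PySem.List.pySetD_natCast]
        refine ⟨rfl, ?_, ?_, ?_⟩
        · simp only [hset, List.length_set]; exact hL
        · have hlen : (xs ++ [x]).length = xs.length + 1 := by simp
          rw [hlen]; push_cast; ring
        · intro n hn
          obtain ⟨hDn, hLn⟩ := hmem n hn
          refine ⟨hDn, ?_⟩
          simp only [hset]
          by_cases hnx : n = x
          · subst hnx
            rw [List.getElem?_set_self (by omega), posList_append]
            simp
          · have hne : List.idxOf x (PySem.Set.ofList xs) + 1 ≠ List.idxOf n (PySem.Set.ofList xs) + 1 := by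
              intro h
              exact hnx (idxOf_inj' _ _ _ hn hx (by omega))
            rw [List.getElem?_set_ne hne, hLn, posList_append]
            have hxn : ¬ x = n := fun h => hnx h.symm
            simp [hxn]
      · have hc : PySem.Set.contains (PySem.Set.ofList xs) x = false := by
          rw [← Bool.not_eq_true, set_contains_iff]; exact hx
        simp only [find_minimum_M_step1, hc, Bool.false_eq_true, if_false]
        have hxxs : x ∉ xs := fun h => hx ((PySem.Set.mem_ofList xs x).mpr h)
        have hadd : PySem.Set.add (PySem.Set.ofList xs) x = PySem.Set.ofList xs ++ [x] := by
          simp only [PySem.Set.add, hc, Bool.false_eq_true, if_false]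
        rw [ofList_append_singleton, hadd]
        have hlenL : PySem.List.len L = ((L.length : Nat) : Int) := by
          simp [PySem.List.len_eq]
        have hgetD : PySem.List.pyGetD (L ++ [[]]) (PySem.List.len L) ([] : List Int) = [] := by
          rw [hlenL, PySem.List.pyGetD_natCast, List.getD_eq_getElem?_getD,
            List.getElem?_concat_length]
          rfl
        have hset : PySem.List.pySetD (L ++ [[]]) (PySem.List.len L)
              (PySem.List.pyGetD (L ++ [[]]) (PySem.List.len L) [] ++ [(xs.length : Int)])
            = L ++ [[(xs.length : Int)]] := by
          rw [hgetD, hlenL, PySem.List.pySetD_natCast, List.set_append_right _ _ (by omega)]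
          simp
        rw [hset]
        refine ⟨rfl, ?_, ?_, ?_⟩
        · simp [hL]
        · have hlen : (xs ++ [x]).length = xs.length + 1 := by simp
          rw [hlen]; push_cast; ring
        · intro n hn
          rcases List.mem_append.mp hn with hn' | hn'
          · have hnx : n ≠ x := fun h => hx (h ▸ hn')
            obtain ⟨hDn, hLn⟩ := hmem n hn'
            have hidxn : List.idxOf n (PySem.Set.ofList xs ++ [x]) = List.idxOf n (PySem.Set.ofList xs) := by
              rw [List.idxOf_append, if_pos hn']
            constructor
            · rw [PySem.Dict.getD_insert_of_ne D _ _ hnx, hDn, hidxn]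
            · rw [hidxn, List.getElem?_append_left
                (by have := List.idxOf_lt_length_of_mem hn'; omega), hLn, posList_append]
              have hxn : ¬ x = n := fun h => hnx h.symm
              simp [hxn]
          · have hnx : n = x := by simpa using hn'
            subst hnx
            have hidxn : List.idxOf n (PySem.Set.ofList xs ++ [n]) = (PySem.Set.ofList xs).length := by
              rw [List.idxOf_append, if_neg hx]
              simp
            constructor
            · rw [PySem.Dict.getD_insert_self, hidxn, hlenL, hL]; push_cast; ring
            · rw [hidxn]
              have hi : (PySem.Set.ofList xs).length + 1 = L.length := by omega
              rw [hi, List.getElem?_concat_length, posList_append, posList_of_not_mem hxxs]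
              simp

theorem altPos_getD (A : List Int) (n : Int) :
    (find_minimum_M_alt_pos A).getD n [] = posList A n := by
  unfold find_minimum_M_alt_pos
  have h : (PySem.List.enumerate A).foldl (fun d q => d.modify q.2 [] (· ++ [q.1]))
        PySem.Dict.empty
      = ((PySem.List.enumerate A).map (fun q => (q.2, q.1))).foldl
        (fun d p => d.modify p.1 [] (· ++ [p.2])) PySem.Dict.empty := by
    rw [List.foldl_map]
  rw [h, PySem.Dict.getD_foldl_modify_append]
  unfold posList
  simp [List.filter_map, List.map_map, Function.comp_def]

theorem altPos_keys (A : List Int) :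
    (find_minimum_M_alt_pos A).keys = PySem.Set.ofList A := by
  unfold find_minimum_M_alt_pos
  have h2 : (List.foldl (fun d q => d.modify q.2 [] fun x => x ++ [q.1])
        (PySem.Dict.empty : PySem.Dict Int (List Int)) (PySem.List.enumerate A)).keys
      = PySem.Set.update (PySem.Dict.empty : PySem.Dict Int (List Int)).keys
        ((PySem.List.enumerate A).map (fun q => q.2)) :=
    PySem.Dict.keys_foldl_modify_key _ _ _ _ _
  rw [h2, PySem.List.map_snd_enumerate]
  rfl

theorem bsLoop_spec (a : List Int) (x : Int) (hs : a.Pairwise (· ≤ ·)) :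
    ∀ (k lo hi : Nat), hi - lo ≤ k → lo ≤ hi → hi ≤ a.length →
    (∀ j (hj : j < a.length), j < lo → a[j] < x) →
    (∀ j (hj : j < a.length), hi ≤ j → x ≤ a[j]) →
    find_minimum_M_bsGo a x k lo hi ≤ a.length ∧
    (∀ j (hj : j < a.length), j < find_minimum_M_bsGo a x k lo hi → a[j] < x) ∧
    (∀ j (hj : j < a.length), find_minimum_M_bsGo a x k lo hi ≤ j → x ≤ a[j]) := by
  intro k
  induction k with
  | zero =>
      intro lo hi hk hle hhi hlow hhigh
      have heq : lo = hi := by omega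
      subst heq
      exact ⟨hhi, fun j hj hjlt => hlow j hj hjlt, fun j hj hjge => hhigh j hj hjge⟩
  | succ f ih =>
      intro lo hi hk hle hhi hlow hhigh
      simp only [find_minimum_M_bsGo]
      by_cases h : lo < hi
      · rw [if_pos h]
        have hmidlt : (lo + hi) / 2 < hi := by omega
        have hmidge : lo ≤ (lo + hi) / 2 := by omega
        have hmlen : (lo + hi) / 2 < a.length := by omega
        have hget : PySem.List.pyGetD a (((lo + hi) / 2 : Nat) : Int) 0 = a[(lo + hi) / 2] := by
          rw [PySem.List.pyGetD_natCast, List.getD_eq_getElem?_getD, List.getElem?_eq_getElem hmlen]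
          rfl
        rw [hget]
        have hpg := List.pairwise_iff_getElem.mp hs
        split_ifs with hcmp
        · exact ih ((lo + hi) / 2 + 1) hi (by omega) (by omega) hhi
            (fun j hj hjlt => by
              rcases Nat.lt_or_ge j ((lo + hi) / 2) with hj' | hj'
              · exact lt_of_le_of_lt (hpg j _ hj hmlen hj') hcmp
              · have hje : j = (lo + hi) / 2 := by omega
                subst hje; exact hcmp)
            hhigh
        · exact ih lo ((lo + hi) / 2) (by omega) (by omega) (by omega) hlow
            (fun j hj hjge => by
              rcases Nat.lt_or_ge ((lo + hi) / 2) j with hj' | hj'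
              · exact le_trans (not_lt.mp hcmp) (hpg _ j hmlen hj hj')
              · have hje : j = (lo + hi) / 2 := by omega
                subst hje; exact not_lt.mp hcmp)
      · rw [if_neg h]
        have heq : lo = hi := by omega
        subst heq
        exact ⟨hhi, fun j hj hjlt => hlow j hj hjlt, fun j hj hjge => hhigh j hj hjge⟩

theorem bisect_spec (a : List Int) (x : Int) (hs : a.Pairwise (· ≤ ·)) :
    find_minimum_M_bisect_left a x ≤ a.length ∧
    (∀ j (hj : j < a.length), j < find_minimum_M_bisect_left a x → a[j] < x) ∧
    (∀ j (hj : j < a.length), find_minimum_M_bisect_left a x ≤ j → x ≤ a[j]) := by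
  unfold find_minimum_M_bisect_left
  exact bsLoop_spec a x hs a.length 0 a.length (by omega) (by omega) le_rfl
    (fun j hj hjlt => by omega) (fun j hj hjge => by omega)

theorem scan_eq (p : Int) : ∀ (lst : List Int) (r : Nat) (hr : r < lst.length),
    (∀ j (hj : j < lst.length), j < r → lst[j] < p) → p ≤ lst[r] →
    find_minimum_M_scan lst p = lst[r] := by
  intro lst
  induction lst with
  | nil => intro r hr; simp at hr
  | cons y ys ih =>
      intro r hr hlow hhigh
      by_cases hy : y < p
      · have hr0 : r ≠ 0 := by
          intro h; subst h; simp at hhigh; omega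
        obtain ⟨r', rfl⟩ : ∃ r', r = r' + 1 := ⟨r - 1, by omega⟩
        simp only [find_minimum_M_scan, if_pos hy]
        have := ih r' (by simpa using hr)
          (fun j hj hjlt => by
            have := hlow (j + 1) (by simpa using hj) (by omega)
            simpa using this)
          (by simpa using hhigh)
        simpa using this
      · have hr0 : r = 0 := by
          by_contra h
          exact hy (by simpa using hlow 0 (by omega) (by omega))
        subst hr0
        simp only [find_minimum_M_scan, if_neg hy]
        simp

theorem getElem_idx_congr (l : List Int) {i j : Nat} (h : i = j) {hi : i < l.length}
    {hj : j < l.length} : l[i] = l[j] := by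
  subst h; rfl

theorem step_eq (A : List Int) (L : List (List Int)) (D : PySem.Dict Int Int)
    (pos : PySem.Dict Int (List Int)) (n M p : Int)
    (hlst : PySem.List.pyGetD L (D.getD n 0) [] = posList A n)
    (hpos : pos.getD n [] = posList A n)
    (hne : posList A n ≠ [])
    (hp : p = 0 ∨ ∃ m, m ≠ n ∧ p ∈ posList A m) :
    find_minimum_M_step2 L D (M, p) n = find_minimum_M_alt_step pos (M, p) n ∧
    (find_minimum_M_step2 L D (M, p) n).2 ∈ posList A n := by
  have hlt := posList_pairwise A n
  have hle : (posList A n).Pairwise (· ≤ ·) := hlt.imp le_of_lt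
  obtain ⟨hr1, hr2, hr3⟩ := bisect_spec (posList A n) p hle
  have hlen0 : 0 < (posList A n).length := List.length_pos_iff.mpr hne
  have hz0 : PySem.List.pyGetD (posList A n) 0 0 = (posList A n)[0] := by
    rw [PySem.List.pyGetD_zero, List.getD_eq_getElem?_getD, List.getElem?_eq_getElem hlen0]
    rfl
  simp only [find_minimum_M_step2, find_minimum_M_alt_step, hlst, hpos]
  by_cases h1 : (posList A n).length = 1
  · simp only [h1, beq_self_eq_true, if_true]
    by_cases hzp : (posList A n)[0] < p
    · have hrr : find_minimum_M_bisect_left (posList A n) p = 1 := by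
        have hne0 : find_minimum_M_bisect_left (posList A n) p ≠ 0 := by
          intro h
          have := hr3 0 (by omega) (by omega)
          omega
        omega
      rw [hz0, if_pos hzp, hrr, if_neg (lt_irrefl 1)]
      exact ⟨rfl, List.getElem_mem _⟩
    · have hrr : find_minimum_M_bisect_left (posList A n) p = 0 := by
        by_contra h
        exact hzp (hr2 0 (by omega) (by omega))
      rw [hz0, if_neg hzp, hrr, if_pos Nat.zero_lt_one]
      have hcast : PySem.List.pyGetD (posList A n) ((0 : Nat) : Int) 0 = (posList A n)[0] := by
        rw [PySem.List.pyGetD_natCast, List.getD_eq_getElem?_getD, List.getElem?_eq_getElem hlen0]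
        rfl
      rw [hcast]
      exact ⟨rfl, List.getElem_mem _⟩
  · have h2 : 2 ≤ (posList A n).length := by omega
    have hbeq : ((posList A n).length == 1) = false := by simp [h1]
    rw [hbeq]
    simp only [Bool.false_eq_true, if_false]
    have hvget : PySem.List.pyGetD (posList A n) (-1) 0
        = (posList A n)[(posList A n).length - 1] := by
      rw [PySem.List.pyGetD_neg_one _ _ hne, List.getLast_eq_getElem]
    have hvmem : (posList A n)[(posList A n).length - 1] ∈ posList A n := List.getElem_mem _
    have hpg := List.pairwise_iff_getElem.mp hle
    have hvp : (posList A n)[(posList A n).length - 1] ≠ p := by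
      rcases hp with rfl | ⟨m, hmn, hpm⟩
      · have h0le : 0 ≤ (posList A n)[0] := posList_nonneg (List.getElem_mem _)
        have := List.pairwise_iff_getElem.mp hlt 0 ((posList A n).length - 1)
          (by omega) (by omega) (by omega)
        omega
      · intro h
        exact hmn (posList_disjoint hpm (h ▸ hvmem))
    rw [hvget]
    by_cases hvgt : p < (posList A n)[(posList A n).length - 1]
    · have hrlen : find_minimum_M_bisect_left (posList A n) p < (posList A n).length := by
        by_contra hge
        have := hr2 ((posList A n).length - 1) (by omega) (by omega)
        omega
      rw [if_pos hvgt, if_pos hrlen]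
      have hscan : find_minimum_M_scan (posList A n) p
          = (posList A n)[find_minimum_M_bisect_left (posList A n) p] :=
        scan_eq p (posList A n) _ hrlen hr2 (hr3 _ hrlen le_rfl)
      have hcast : PySem.List.pyGetD (posList A n)
            ((find_minimum_M_bisect_left (posList A n) p : Nat) : Int) 0
          = (posList A n)[find_minimum_M_bisect_left (posList A n) p] := by
        rw [PySem.List.pyGetD_natCast, List.getD_eq_getElem?_getD,
          List.getElem?_eq_getElem hrlen]
        rfl
      rw [hscan, hcast]
      exact ⟨rfl, List.getElem_mem _⟩
    · have hvlt : (posList A n)[(posList A n).length - 1] < p :=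
        lt_of_le_of_ne (not_lt.mp hvgt) hvp
      have hrlen : ¬ find_minimum_M_bisect_left (posList A n) p < (posList A n).length := by
        intro hlt'
        have hge := hr3 _ hlt' le_rfl
        have hler : (posList A n)[find_minimum_M_bisect_left (posList A n) p]
            ≤ (posList A n)[(posList A n).length - 1] := by
          rcases Nat.lt_or_ge (find_minimum_M_bisect_left (posList A n) p)
            ((posList A n).length - 1) with h' | h'
          · exact hpg _ _ hlt' (by omega) h'
          · exact le_of_eq (getElem_idx_congr (posList A n) (by omega))
        omega
      rw [if_neg hvgt, if_neg hrlen, hz0]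
      exact ⟨rfl, List.getElem_mem _⟩

theorem fold_eq (A : List Int) (L : List (List Int)) (D : PySem.Dict Int Int)
    (pos : PySem.Dict Int (List Int))
    (hL : ∀ n ∈ PySem.Set.ofList A, PySem.List.pyGetD L (D.getD n 0) [] = posList A n)
    (hpos : ∀ n, pos.getD n [] = posList A n) :
    ∀ (l : List Int) (M p : Int), l.Nodup → (∀ n ∈ l, n ∈ PySem.Set.ofList A) →
    (p = 0 ∨ ∃ m, m ∉ l ∧ p ∈ posList A m) →
    (l.foldl (find_minimum_M_step2 L D) (M, p)).1
      = (l.foldl (find_minimum_M_alt_step pos) (M, p)).1 := by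
  intro l
  induction l with
  | nil => intro M p _ _ _; rfl
  | cons n t ih =>
      intro M p hnd hmem hp
      have hnA : n ∈ PySem.Set.ofList A := hmem n (List.mem_cons_self)
      have hne : posList A n ≠ [] := posList_ne_nil ((PySem.Set.mem_ofList A n).mp hnA)
      have hp' : p = 0 ∨ ∃ m, m ≠ n ∧ p ∈ posList A m := by
        rcases hp with h | ⟨m, hml, hpm⟩
        · exact Or.inl h
        · exact Or.inr ⟨m, fun h => hml (h ▸ List.mem_cons_self), hpm⟩
      obtain ⟨hstep, hmem2⟩ := step_eq A L D pos n M p (hL n hnA) (hpos n) hne hp'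
      rw [List.foldl_cons, List.foldl_cons, ← hstep]
      obtain ⟨hnt, hnd'⟩ := List.nodup_cons.mp hnd
      have hinv : (find_minimum_M_step2 L D (M, p) n).2 = 0 ∨
          ∃ m, m ∉ t ∧ (find_minimum_M_step2 L D (M, p) n).2 ∈ posList A m :=
        Or.inr ⟨n, hnt, hmem2⟩
      have hmem' : ∀ x ∈ t, x ∈ PySem.Set.ofList A :=
        fun x hx => hmem x (List.mem_cons_of_mem _ hx)
      have := ih (find_minimum_M_step2 L D (M, p) n).1 (find_minimum_M_step2 L D (M, p) n).2
        hnd' hmem' hinv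
      simpa using this

theorem main_eq (A : List Int) (N : Int) : find_minimum_M A N = find_minimum_M_alt A N := by
  obtain ⟨hS, hLlen, hp, hmem⟩ := phase1_spec A
  simp only [find_minimum_M, find_minimum_M_alt]
  rw [hS, altPos_keys]
  have hnd : (PySem.List.sorted (PySem.Set.ofList A) (fun x => x) false).Nodup :=
    (PySem.List.sorted_perm _ _ _).nodup_iff.mpr (PySem.Set.nodup_ofList A)
  have hmm : ∀ n ∈ PySem.List.sorted (PySem.Set.ofList A) (fun x => x) false,
      n ∈ PySem.Set.ofList A :=
    fun n hn => (PySem.List.mem_sorted _ _ _ _).mp hn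
  apply fold_eq A _ _ _ ?_ (altPos_getD A) _ 1 0 hnd hmm (Or.inl rfl)
  intro n hn
  obtain ⟨hD, hLn⟩ := hmem n hn
  rw [hD]
  have hc : ((List.idxOf n (PySem.Set.ofList A) : Int) + 1)
      = ((List.idxOf n (PySem.Set.ofList A) + 1 : Nat) : Int) := by push_cast; ring
  rw [hc, PySem.List.pyGetD_natCast, List.getD_eq_getElem?_getD, hLn]
  rfl

-- ===== VERDICT (by name: the statement is the Claim_ definition above) =====
theorem find_minimum_M_spec : Claim_equal_find_minimum_M := by
  intro A N _
  show find_minimum_M A N = find_minimum_M_alt A N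
  exact main_eq A N
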